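-- pv_equiv track=rewrite | github.com/ThiagoFreitasFreelancer/Gerenciamento-De-Indece | Index.py | PrimeiroCaso
-- ===== SOURCE A (Python) =====
-- def PrimeiroCaso(consulta, arquivo):
--     aparicoes = 0
--     result = {}
--     pla = False
--     string = ''
--
--     for palavra in consulta:
--         for element in arquivo:
--             for palavraElemento in element:
--
--                 if(palavra == palavraElemento and type(palavraElemento) == str):
--                     aparicoes = aparicoes + 1
--                     pla = True
--
--             if(pla):
--                 num = len(element)
--                 string = string + ' ' + str(aparicoes) + ',' + str(element[num - 1])
--                 result[palavra] = string
--
--             aparicoes = 0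
--             pla = False
--
--         string = ''
--
--     return result
-- ===== SOURCE B (Python) =====
-- def PrimeiroCaso(consulta, arquivo):
--     # Build an inverted index once: word -> accumulated " count,lastword" string over documents.
--     index = {}
--     for element in arquivo:
--         if not element:
--             continue
--         counts = {}
--         for w in element:
--             counts[w] = counts.get(w, 0) + 1
--         suffix = ',' + element[-1]
--         for w, c in counts.items():
--             index[w] = index.get(w, '') + ' ' + str(c) + suffix
--     result = {}
--     for w in consulta:
--         if w in index:
--             result[w] = index[w]
--     return result
-- ===== Notes on version B (the rewrite author's own statement) =====
-- stated objective: faster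
-- what changed: Replaces the per-query rescans of every document (triple nested loop) by a single pass that builds an inverted index of per-document count strings, so each query word is answered by one dictionary lookup.
import Mathlib
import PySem

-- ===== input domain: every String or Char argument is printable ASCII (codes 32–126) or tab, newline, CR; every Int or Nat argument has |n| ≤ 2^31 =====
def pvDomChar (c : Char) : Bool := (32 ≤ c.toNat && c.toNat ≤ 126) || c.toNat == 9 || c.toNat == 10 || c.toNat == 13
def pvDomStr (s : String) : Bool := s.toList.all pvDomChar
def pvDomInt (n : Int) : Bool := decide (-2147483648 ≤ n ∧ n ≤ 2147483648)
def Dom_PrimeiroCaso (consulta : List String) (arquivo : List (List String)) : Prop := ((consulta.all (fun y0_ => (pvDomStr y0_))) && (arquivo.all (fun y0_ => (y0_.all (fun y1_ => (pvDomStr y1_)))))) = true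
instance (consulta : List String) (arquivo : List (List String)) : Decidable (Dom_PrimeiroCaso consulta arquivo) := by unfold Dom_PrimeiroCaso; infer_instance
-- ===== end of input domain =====

-- B replaces A's triple nested rescan by one pass building an inverted index of per-document
-- count strings, answered per query word by a single lookup (objective: faster).

-- ===== PORT A =====
-- state throughout: (aparicoes, result, pla, string)
-- inner loop: for palavraElemento in element
def pvAword (palavra : String) (st : Int × PySem.Dict String String × Bool × String) (palavraElemento : String) : Int × PySem.Dict String String × Bool × String :=
  if palavra == palavraElemento then (st.1 + 1, st.2.1, true, st.2.2.2) else st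

-- body of: for element in arquivo
def pvAdoc (palavra : String) (st : Int × PySem.Dict String String × Bool × String) (element : List String) : Int × PySem.Dict String String × Bool × String :=
  let st3 := element.foldl (pvAword palavra) st
  let st4 :=
    if st3.2.2.1 then
      let num : Int := (element.length : Int)
      -- element[num - 1]: pla = true guarantees element is nonempty, so pyGet? is some (getD never used)
      let string := st3.2.2.2 ++ " " ++ PySem.Int.toStr st3.1 ++ "," ++ (PySem.List.pyGet? element (num - 1)).getD ""
      (st3.1, st3.2.1.insert palavra string, st3.2.2.1, string)
    else st3
  (0, st4.2.1, false, st4.2.2.2)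

-- body of: for palavra in consulta (string = '' at the end)
def pvAquery (arquivo : List (List String)) (st : Int × PySem.Dict String String × Bool × String) (palavra : String) : Int × PySem.Dict String String × Bool × String :=
  let st2 := arquivo.foldl (pvAdoc palavra) st
  (st2.1, st2.2.1, st2.2.2.1, "")

def PrimeiroCaso (consulta : List String) (arquivo : List (List String)) : List (String × String) :=
  (consulta.foldl (pvAquery arquivo) ((0 : Int), PySem.Dict.empty, false, "")).2.1.items

-- ===== PORT B =====
-- one document's contribution to the inverted index
def pvBdoc (index : PySem.Dict String String) (element : List String) : PySem.Dict String String :=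
  if element.isEmpty then index
  else
    let counts := element.foldl (fun (d : PySem.Dict String Int) w => d.insert w (d.getD w 0 + 1)) PySem.Dict.empty
    let suffix := "," ++ (PySem.List.pyGet? element (-1)).getD ""
    counts.items.foldl (fun (idx : PySem.Dict String String) p =>
        idx.insert p.1 (idx.getD p.1 "" ++ " " ++ PySem.Int.toStr p.2 ++ suffix)) index

def PrimeiroCaso_alt (consulta : List String) (arquivo : List (List String)) : List (String × String) :=
  let index := arquivo.foldl pvBdoc PySem.Dict.empty
  let result := consulta.foldl (fun (r : PySem.Dict String String) w =>
      if index.contains w then r.insert w (index.getD w "") else r) PySem.Dict.empty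
  result.items

-- ===== PRECONDITION & SPEC =====
def Spec_PrimeiroCaso (consulta : List String) (arquivo : List (List String)) (out : List (String × String)) : Prop := out = PrimeiroCaso_alt consulta arquivo
instance (consulta : List String) (arquivo : List (List String)) (out : List (String × String)) : Decidable (Spec_PrimeiroCaso consulta arquivo out) := by unfold Spec_PrimeiroCaso; infer_instance

-- ===== CLAIM (what is proved, stated in full; the proofs are below) =====
def Claim_equal_PrimeiroCaso : Prop := ∀ (consulta : List String) (arquivo : List (List String)), Dom_PrimeiroCaso consulta arquivo → Spec_PrimeiroCaso consulta arquivo (PrimeiroCaso consulta arquivo)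

-- ===== LEMMAS AND PROOFS =====

-- the string chunk one matching document contributes for word w
def pvP (w : String) (e : List String) : String :=
  " " ++ PySem.Int.toStr (e.count w : Int) ++ "," ++ (PySem.List.pyGet? e (-1)).getD ""

-- concatenation of the chunks of all documents containing w
def pvT (w : String) : List (List String) → String
  | [] => ""
  | e :: rest => (if w ∈ e then pvP w e else "") ++ pvT w rest

-- does any document contain w
def pvM (w : String) (docs : List (List String)) : Bool := docs.any (fun e => e.contains w)

theorem pvLast_eq (e : List String) (h : e ≠ []) :
    (PySem.List.pyGet? e ((e.length : Int) - 1)).getD "" = (PySem.List.pyGet? e (-1)).getD "" := by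
  have hl : 0 < e.length := List.length_pos_of_ne_nil h
  have h1 : ((e.length : Int) - 1) = ((e.length - 1 : Nat) : Int) := by omega
  rw [h1, PySem.List.pyGet?_natCast, PySem.List.pyGet?_neg_one, List.getLast?_eq_getElem?]

theorem pvT_of_not_M (w : String) (docs : List (List String)) (h : pvM w docs = false) :
    pvT w docs = "" := by
  induction docs with
  | nil => rfl
  | cons e rest ih =>
    simp only [pvM, List.any_cons, Bool.or_eq_false_iff] at h
    have hne : w ∉ e := by
      intro hm
      have := h.1
      simp at this
      exact this hm
    simp [pvT, hne, ih h.2]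

theorem pvA_count (w : String) (e : List String) :
    ∀ (ap : Int) (d : PySem.Dict String String) (pl : Bool) (s : String),
    e.foldl (pvAword w) (ap, d, pl, s) = (ap + (e.count w : Int), d, pl || e.contains w, s) := by
  induction e with
  | nil => intro ap d pl s; simp [List.count_nil]
  | cons x e ih =>
    intro ap d pl s
    by_cases h : w = x
    · subst h
      simp only [List.foldl_cons, pvAword, beq_self_eq_true, if_true]
      rw [ih]
      have hcnt : ((w :: e).count w : Int) = (e.count w : Int) + 1 := by
        push_cast [List.count_cons]; simp
      have hcon : (w :: e).contains w = true := by simp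
      rw [hcnt, hcon, Bool.or_true]
      have harith : ap + 1 + (e.count w : Int) = ap + ((e.count w : Int) + 1) := by ring
      rw [harith, Bool.true_or]
    · have hb : (w == x) = false := by simp [h]
      simp only [List.foldl_cons, pvAword, hb, Bool.false_eq_true, if_false]
      rw [ih]
      have hb2 : (x == w) = false := by
        simp only [beq_eq_false_iff_ne, ne_eq]
        exact fun hh => h hh.symm
      have hcnt : (x :: e).count w = e.count w := by
        rw [List.count_cons, hb2]; simp
      have hcon : (x :: e).contains w = e.contains w := by
        simp only [List.contains_cons, hb, Bool.false_or]
      rw [hcnt, hcon]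

theorem pvA_docLoop (w : String) (docs : List (List String)) :
    ∀ (r : PySem.Dict String String) (s : String),
    docs.foldl (pvAdoc w) ((0 : Int), r, false, s) =
      ((0 : Int), (if pvM w docs then r.insert w (s ++ pvT w docs) else r), false, s ++ pvT w docs) := by
  induction docs with
  | nil => intro r s; simp [pvM, pvT]
  | cons e rest ih =>
    intro r s
    simp only [List.foldl_cons]
    by_cases he : w ∈ e
    · have hc : e.contains w = true := by simpa using he
      have hne : e ≠ [] := by rintro rfl; exact absurd he List.not_mem_nil
      have hstep : pvAdoc w ((0 : Int), r, false, s) e =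
          ((0 : Int), r.insert w (s ++ pvP w e), false, s ++ pvP w e) := by
        unfold pvAdoc
        rw [pvA_count]
        simp only [hc, Bool.false_or, if_true, zero_add]
        rw [pvLast_eq e hne]
        simp [pvP, String.append_assoc]
      have hMc : pvM w (e :: rest) = true := by simp only [pvM, List.any_cons, hc, Bool.true_or]
      have hTc : pvT w (e :: rest) = pvP w e ++ pvT w rest := by simp [pvT, he]
      rw [hstep, ih, hMc, hTc]
      cases hm : pvM w rest with
      | true =>
        rw [hm] at ih
        simp only [if_true, PySem.Dict.insert_insert_self, String.append_assoc]
      | false =>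
        rw [pvT_of_not_M w rest hm]
        simp
    · have hc : e.contains w = false := by simpa using he
      have hstep : pvAdoc w ((0 : Int), r, false, s) e = ((0 : Int), r, false, s) := by
        unfold pvAdoc
        rw [pvA_count]
        simp [he]
      have hMc : pvM w (e :: rest) = pvM w rest := by simp only [pvM, List.any_cons, hc, Bool.false_or]
      have hTc : pvT w (e :: rest) = pvT w rest := by simp [pvT, he]
      rw [hstep, ih, hMc, hTc]

theorem pvA_queryLoop (arquivo : List (List String)) (cs : List String) :
    ∀ (r : PySem.Dict String String),
    cs.foldl (pvAquery arquivo) ((0 : Int), r, false, "") =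
      ((0 : Int), cs.foldl (fun r w => if pvM w arquivo then r.insert w (pvT w arquivo) else r) r, false, "") := by
  induction cs with
  | nil => intro r; rfl
  | cons w cs ih =>
    intro r
    simp only [List.foldl_cons]
    have hq : pvAquery arquivo ((0 : Int), r, false, "") w =
        ((0 : Int), (if pvM w arquivo then r.insert w (pvT w arquivo) else r), false, "") := by
      unfold pvAquery
      rw [pvA_docLoop]
      simp
    rw [hq, ih]

theorem pvFind_self (xs : List String) (u : String) :
    xs.find? (fun k => k == u) = if u ∈ xs then some u else none := by
  induction xs with
  | nil => rfl
  | cons x xs ih =>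
    by_cases h : x = u
    · subst h; simp [List.find?]
    · have hb : (x == u) = false := by simp [h]
      simp only [List.find?, hb, ih, List.mem_cons]
      by_cases hm : u ∈ xs
      · simp [hm]
      · simp only [hm, if_false, or_false]
        rw [if_neg (fun (hh : u = x) => h hh.symm)]

theorem pvFold_untouched (a b : String) (l : List (String × Int)) :
    ∀ (idx : PySem.Dict String String) (u : String), u ∉ l.map Prod.fst →
    (l.foldl (fun (idx : PySem.Dict String String) p =>
        idx.insert p.1 (idx.getD p.1 "" ++ a ++ PySem.Int.toStr p.2 ++ b)) idx).get? u = idx.get? u := by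
  induction l with
  | nil => intro idx u _; rfl
  | cons p l ih =>
    intro idx u hu
    simp only [List.map_cons, List.mem_cons, not_or] at hu
    simp only [List.foldl_cons]
    rw [ih _ _ hu.2, PySem.Dict.get?_insert_of_ne _ _ hu.1]

theorem pvFold_get? (a b : String) (l : List (String × Int)) :
    ∀ (idx : PySem.Dict String String) (u : String), (l.map Prod.fst).Nodup →
    (l.foldl (fun (idx : PySem.Dict String String) p =>
        idx.insert p.1 (idx.getD p.1 "" ++ a ++ PySem.Int.toStr p.2 ++ b)) idx).get? u =
      match l.find? (fun p => p.1 == u) with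
      | some p => some (idx.getD u "" ++ a ++ PySem.Int.toStr p.2 ++ b)
      | none => idx.get? u := by
  induction l with
  | nil => intro idx u _; rfl
  | cons p l ih =>
    intro idx u hnd
    simp only [List.map_cons, List.nodup_cons] at hnd
    simp only [List.foldl_cons]
    by_cases h : p.1 = u
    · subst h
      have hfind : (p :: l).find? (fun q => q.1 == p.1) = some p := by simp [List.find?]
      rw [hfind]
      rw [pvFold_untouched _ _ _ _ _ hnd.1]
      rw [PySem.Dict.get?_insert_self]
    · have hb : (p.1 == u) = false := by simp [h]
      have hfind : (p :: l).find? (fun q => q.1 == u) = l.find? (fun q => q.1 == u) := by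
        simp [List.find?, hb]
      rw [hfind, ih _ _ hnd.2]
      rw [PySem.Dict.get?_insert_of_ne _ _ (Ne.symm h)]
      rw [PySem.Dict.getD_insert_of_ne _ _ _ (Ne.symm h)]

theorem pvBdoc_get? (e : List String) (he : e ≠ []) (idx : PySem.Dict String String) (u : String) :
    (pvBdoc idx e).get? u =
      if u ∈ e then some (idx.getD u "" ++ pvP u e) else idx.get? u := by
  have hemp : e.isEmpty = false := by simp [he]
  unfold pvBdoc
  rw [hemp]
  simp only [Bool.false_eq_true, if_false]
  rw [PySem.Dict.foldl_insert_getD_add_one_eq_counter]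
  rw [pvFold_get?]
  · rw [PySem.Dict.items_counter]
    rw [List.find?_map]
    have hcomp : ((fun (p : String × Int) => p.1 == u) ∘ (fun k => (k, (e.count k : Int)))) = (fun k => k == u) := rfl
    rw [hcomp, pvFind_self]
    by_cases hu : u ∈ e
    · have hset : u ∈ PySem.Set.ofList e := by rw [PySem.Set.mem_ofList]; exact hu
      simp only [hset, if_true, hu, Option.map_some]
      simp [pvP, String.append_assoc]
    · have hset : u ∉ PySem.Set.ofList e := by rw [PySem.Set.mem_ofList]; exact hu
      simp [hset, hu]
  · rw [PySem.Dict.items_counter]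
    have : ((PySem.Set.ofList e).map (fun k => (k, (e.count k : Int)))).map Prod.fst = PySem.Set.ofList e := by
      simp [List.map_map, Function.comp_def]
    rw [this]
    exact PySem.Set.nodup_ofList e

theorem pvB_index_get? (docs : List (List String)) :
    ∀ (idx : PySem.Dict String String) (u : String),
    (docs.foldl pvBdoc idx).get? u =
      if pvM u docs then some (idx.getD u "" ++ pvT u docs) else idx.get? u := by
  induction docs with
  | nil => intro idx u; simp [pvM]
  | cons e rest ih =>
    intro idx u
    simp only [List.foldl_cons]
    rw [ih]
    by_cases hne : e = []
    · subst hne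
      have h0 : pvBdoc idx [] = idx := rfl
      have hMc : pvM u ([] :: rest) = pvM u rest := by
        simp only [pvM, List.any_cons, List.contains_nil, Bool.false_or]
      have hTc : pvT u ([] :: rest) = pvT u rest := by simp [pvT]
      rw [h0, hMc, hTc]
    · by_cases hu : u ∈ e
      · have hMc : pvM u (e :: rest) = true := by
          have hc : e.contains u = true := by simpa using hu
          simp only [pvM, List.any_cons, hc, Bool.true_or]
        have hTc : pvT u (e :: rest) = pvP u e ++ pvT u rest := by simp [pvT, hu]
        have hg : (pvBdoc idx e).get? u = some (idx.getD u "" ++ pvP u e) := by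
          rw [pvBdoc_get? e hne, if_pos hu]
        have hgd : (pvBdoc idx e).getD u "" = idx.getD u "" ++ pvP u e := by
          rw [PySem.Dict.getD_eq_get?_getD, hg]; rfl
        rw [hMc, hTc]
        cases hm : pvM u rest with
        | true => simp [hgd, String.append_assoc]
        | false =>
          rw [pvT_of_not_M u rest hm]
          simp [hg]
      · have hMc : pvM u (e :: rest) = pvM u rest := by
          have hc : e.contains u = false := by simpa using hu
          simp only [pvM, List.any_cons, hc, Bool.false_or]
        have hTc : pvT u (e :: rest) = pvT u rest := by simp [pvT, hu]
        have hg : (pvBdoc idx e).get? u = idx.get? u := by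
          rw [pvBdoc_get? e hne, if_neg hu]
        have hgd : (pvBdoc idx e).getD u "" = idx.getD u "" := by
          rw [PySem.Dict.getD_eq_get?_getD, hg, ← PySem.Dict.getD_eq_get?_getD]
        rw [hMc, hTc, hg, hgd]

-- ===== VERDICT (by name: the statement is the Claim_ definition above) =====
theorem PrimeiroCaso_spec : Claim_equal_PrimeiroCaso := by
  intro consulta arquivo _
  unfold Spec_PrimeiroCaso PrimeiroCaso PrimeiroCaso_alt
  rw [pvA_queryLoop]
  have hstep : (fun (r : PySem.Dict String String) w =>
      if (arquivo.foldl pvBdoc PySem.Dict.empty).contains w then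
        r.insert w ((arquivo.foldl pvBdoc PySem.Dict.empty).getD w "") else r)
      = (fun (r : PySem.Dict String String) w =>
        if pvM w arquivo then r.insert w (pvT w arquivo) else r) := by
    funext r w
    have hg : (arquivo.foldl pvBdoc PySem.Dict.empty).get? w =
        if pvM w arquivo then some (pvT w arquivo) else none := by
      rw [pvB_index_get?]
      simp [PySem.Dict.getD_empty, PySem.Dict.get?_empty]
    by_cases hm : pvM w arquivo = true
    · have h1 : (arquivo.foldl pvBdoc PySem.Dict.empty).contains w = true := by
        rw [PySem.Dict.contains_eq_isSome_get?, hg, hm]; rfl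
      have h2 : (arquivo.foldl pvBdoc PySem.Dict.empty).getD w "" = pvT w arquivo := by
        rw [PySem.Dict.getD_eq_get?_getD, hg, hm]; rfl
      simp [h1, h2, hm]
    · rw [Bool.not_eq_true] at hm
      have h1 : (arquivo.foldl pvBdoc PySem.Dict.empty).contains w = false := by
        rw [PySem.Dict.contains_eq_isSome_get?, hg, hm]; rfl
      simp [h1, hm]
  change (List.foldl (fun r w => if pvM w arquivo = true then r.insert w (pvT w arquivo) else r) PySem.Dict.empty consulta).items =
    (List.foldl (fun (r : PySem.Dict String String) w =>
      if (List.foldl pvBdoc PySem.Dict.empty arquivo).contains w = true then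
        r.insert w ((List.foldl pvBdoc PySem.Dict.empty arquivo).getD w "") else r) PySem.Dict.empty consulta).items
  rw [hstep]
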